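-- pv_equiv track=rewrite | github.com/joye/vlsi-cad | complement.py | negative_cofactor
-- ===== SOURCE A (Python) =====
-- def negative_cofactor(index_size,cube_size,cube_list,variable,index_hash):
-- 	temp_cube_list = [i for i in cube_list]
-- 	for i in index_hash:
-- 		index_list = index_hash[i]
-- 		if i == 1:
-- 			for index in index_list:
-- 				temp_cube_list[index] = 0
-- 				cube_size = cube_size - 1
-- 		elif i == -1:
-- 			for index in index_list:
-- 				cube = temp_cube_list[index]
-- 				cube_s = cube[0]
-- 				cube_t = cube[1:]
-- 				cube_t.remove(-variable)
-- 				cube_s = cube_s - 1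
-- 				cube_t.insert(0,cube_s)
-- 				temp_cube_list[index] = cube_t
-- 	temp_cube_list = [i for i in temp_cube_list if i!=0]
-- 	return (index_size-1,cube_size,temp_cube_list)
-- ===== SOURCE B (Python) =====
-- def negative_cofactor(index_size, cube_size, cube_list, variable, index_hash):
--     # Reverse map: cube position -> its group (1 = drop, -1 = cofactor).
--     action = {}
--     for group, index_list in index_hash.items():
--         if group == 1 or group == -1:
--             for index in index_list:
--                 action[index] = group
--     result = []
--     for position, cube in enumerate(cube_list):
--         g = action.get(position)
--         if g == 1:
--             cube_size -= 1
--         elif g == -1: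
--             cube_t = cube[1:]
--             cube_t.remove(-variable)
--             cube_t.insert(0, cube[0] - 1)
--             result.append(cube_t)
--         else:
--             result.append(cube)
--     return (index_size - 1, cube_size, result)
-- ===== Notes on version B (the rewrite author's own statement) =====
-- stated objective: simpler
-- what changed: A makes three passes (copy, grouped in-place zeroing/rewriting driven by the dict, then a filter that drops the 0 sentinels); B inverts the dict once into a position->group table and builds the result in a single pass over enumerate(cube_list), with no sentinel and no final filter.
-- intended difference: On inputs where a group 1 or group -1 index list contains a negative index, A silently applies Python's negative-index wraparound and drops/rewrites the cube at that wrapped position, while B treats indices as plain cube positions and leaves such cubes untouched; positions are nonnegative, so B's reading is the intended one. — e.g. on negative_cofactor(2, 1, [[2, 3, -1]], 1, [(-1, [-1])]): A returns (1, 1, [[1, 3]]), B returns (1, 1, [[2, 3, -1]])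
-- outside the precondition, e.g. on negative_cofactor(1, 1, [[2, 1, 2]], 1, {1: [0, 0]}): A returns (0, -1, []), B returns (0, 0, [])
import Mathlib
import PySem

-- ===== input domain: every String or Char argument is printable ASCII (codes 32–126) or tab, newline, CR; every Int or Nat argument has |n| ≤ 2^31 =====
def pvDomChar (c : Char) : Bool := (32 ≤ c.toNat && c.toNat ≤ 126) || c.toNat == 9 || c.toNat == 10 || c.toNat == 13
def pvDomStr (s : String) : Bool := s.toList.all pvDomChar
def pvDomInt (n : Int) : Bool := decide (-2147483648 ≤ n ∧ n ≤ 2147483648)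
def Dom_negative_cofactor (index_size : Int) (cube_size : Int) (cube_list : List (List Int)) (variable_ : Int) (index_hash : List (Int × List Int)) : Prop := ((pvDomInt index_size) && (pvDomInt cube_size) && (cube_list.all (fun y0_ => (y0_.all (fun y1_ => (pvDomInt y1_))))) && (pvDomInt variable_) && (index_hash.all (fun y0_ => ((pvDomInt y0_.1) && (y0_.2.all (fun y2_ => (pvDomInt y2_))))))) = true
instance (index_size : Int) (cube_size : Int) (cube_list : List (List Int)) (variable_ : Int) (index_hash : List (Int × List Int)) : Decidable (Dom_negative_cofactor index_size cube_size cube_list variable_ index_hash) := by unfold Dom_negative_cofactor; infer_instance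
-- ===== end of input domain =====

-- B replaces A's three passes (copy, dict-driven in-place zeroing/rewriting, filter of 0-sentinels)
-- by one inverted position->group table and a single output pass (objective: simpler).
-- Intended difference (D_): A applies Python negative-index wraparound to group indices; B treats them
-- as plain cube positions and leaves such cubes untouched.

-- ===== PORT A =====
-- shared cofactor transform: cube_s = cube[0]; cube_t = cube[1:]; cube_t.remove(-variable);
-- cube_t.insert(0, cube_s - 1)  — none exactly where Python raises (IndexError on [] / ValueError)
def pvNegCube (variable_ : Int) (cube : List Int) : Option (List Int) :=
  match cube with
  | [] => none
  | s :: t => (PySem.List.remove? t (-variable_)).map (fun t' => (s - 1) :: t')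

-- temp_cube_list entries: `none` models the int 0 sentinel A stores (a list value never equals 0,
-- so the final `i != 0` filter is exactly `filterMap id`).
-- one iteration of A's group -1 loop: cube = temp_cube_list[index]; … ; temp_cube_list[index] = cube_t
def pvStepNeg (variable_ : Int) (temp : List (Option (List Int))) (idx : Int) : List (Option (List Int)) :=
  match PySem.List.pyGet? temp idx with
  | some (some cube) =>
    match pvNegCube variable_ cube with
    | some cube_t => PySem.List.pySetD temp idx (some cube_t)
    | none => temp                              -- ValueError from remove: outside Pre_
  | _ => temp                                   -- IndexError / entry already 0: outside Pre_

def negative_cofactor (index_size : Int) (cube_size : Int) (cube_list : List (List Int)) (variable_ : Int) (index_hash : List (Int × List Int)) : Int × Int × List (List Int) :=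
  -- `for i in index_hash: index_list = index_hash[i]` = fold over the dict's items
  let st := ((PySem.Dict.ofList index_hash).items).foldl
    (fun (st : List (Option (List Int)) × Int) e =>
      if e.1 = 1 then
        e.2.foldl (fun st2 idx =>
          match PySem.List.pySet? st2.1 idx none with   -- temp_cube_list[index] = 0
          | some temp' => (temp', st2.2 - 1)
          | none => st2) st                             -- IndexError: outside Pre_
      else if e.1 = -1 then
        (e.2.foldl (pvStepNeg variable_) st.1, st.2)
      else st)
    (cube_list.map some, cube_size)
  (index_size - 1, st.2, st.1.filterMap id)

-- ===== PORT B =====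
def negative_cofactor_alt (index_size : Int) (cube_size : Int) (cube_list : List (List Int)) (variable_ : Int) (index_hash : List (Int × List Int)) : Int × Int × List (List Int) :=
  let action : PySem.Dict Int Int :=
    ((PySem.Dict.ofList index_hash).items).foldl
      (fun a e =>
        if e.1 = 1 ∨ e.1 = -1 then e.2.foldl (fun a idx => a.insert idx e.1) a else a)
      PySem.Dict.empty
  let st := (PySem.List.enumerate cube_list 0).foldl
    (fun (st : Int × List (List Int)) pc =>
      if action.get? pc.1 = some 1 then (st.1 - 1, st.2)
      else if action.get? pc.1 = some (-1) then
        match pvNegCube variable_ pc.2 with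
        | some cube_t => (st.1, st.2 ++ [cube_t])
        | none => st                                    -- ValueError from remove: outside Pre_
      else (st.1, st.2 ++ [pc.2]))
    (cube_size, [])
  (index_size - 1, st.1, st.2)

-- ===== PRECONDITION & SPEC =====
-- the index list the Python dict holds under key k ([] if absent)
def pvGroup (index_hash : List (Int × List Int)) (k : Int) : List Int :=
  ((PySem.Dict.ofList index_hash).get? k).getD []

-- Pre_ excludes inputs where A raises (an out-of-range index: IndexError; a group -1 cube without
-- -variable after its head: ValueError/TypeError) and, as a defensible-corner artefact, inputs whose
-- group 1 / group -1 index lists repeat or overlap (as Python positions): there A double-decrements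
-- cube_size or its result depends on dict insertion order.
def Pre_negative_cofactor (index_size : Int) (cube_size : Int) (cube_list : List (List Int)) (variable_ : Int) (index_hash : List (Int × List Int)) : Prop :=
  (∀ idx ∈ pvGroup index_hash 1 ++ pvGroup index_hash (-1), PySem.Raise.InRange cube_list.length idx) ∧
  ((pvGroup index_hash 1 ++ pvGroup index_hash (-1)).map (fun i => i % (cube_list.length : Int))).Nodup ∧
  (∀ idx ∈ pvGroup index_hash (-1), -variable_ ∈ (PySem.List.pyGetD cube_list idx []).tail)

instance (index_size : Int) (cube_size : Int) (cube_list : List (List Int)) (variable_ : Int) (index_hash : List (Int × List Int)) : Decidable (Pre_negative_cofactor index_size cube_size cube_list variable_ index_hash) := by unfold Pre_negative_cofactor; infer_instance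

def pvWitness_negative_cofactor : Int × Int × List (List Int) × Int × (List (Int × List Int)) :=
  (2, 2, [[2, 1, 2], [1, 3]], -3, [(1, [0]), (-1, [1])])

-- On inputs where a group 1 or group -1 index list contains a negative index, A silently applies
-- Python's negative-index wraparound and drops/rewrites the cube at the wrapped position, while B
-- treats indices as plain cube positions and leaves such cubes untouched; positions are nonnegative,
-- so B's reading is the intended one.
def D_negative_cofactor (index_size : Int) (cube_size : Int) (cube_list : List (List Int)) (variable_ : Int) (index_hash : List (Int × List Int)) : Prop :=
  ∃ idx ∈ pvGroup index_hash 1 ++ pvGroup index_hash (-1), idx < 0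

instance (index_size : Int) (cube_size : Int) (cube_list : List (List Int)) (variable_ : Int) (index_hash : List (Int × List Int)) : Decidable (D_negative_cofactor index_size cube_size cube_list variable_ index_hash) := by unfold D_negative_cofactor; infer_instance

def Spec_negative_cofactor (index_size : Int) (cube_size : Int) (cube_list : List (List Int)) (variable_ : Int) (index_hash : List (Int × List Int)) (out : Int × Int × List (List Int)) : Prop := ¬ D_negative_cofactor index_size cube_size cube_list variable_ index_hash → out = negative_cofactor_alt index_size cube_size cube_list variable_ index_hash
instance (index_size : Int) (cube_size : Int) (cube_list : List (List Int)) (variable_ : Int) (index_hash : List (Int × List Int)) (out : Int × Int × List (List Int)) : Decidable (Spec_negative_cofactor index_size cube_size cube_list variable_ index_hash out) := by unfold Spec_negative_cofactor; infer_instance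

def pvDiffWitness_negative_cofactor : Int × Int × List (List Int) × Int × (List (Int × List Int)) :=
  (2, 1, [[2, 3, -1]], 1, [(-1, [-1])])
def pvDiffWitnessOut_negative_cofactor : (Int × Int × List (List Int)) × (Int × Int × List (List Int)) :=
  ((1, 1, [[1, 3]]), (1, 1, [[2, 3, -1]]))

-- ===== CLAIM (what is proved, stated in full; the proofs are below) =====
def Claim_unchanged_negative_cofactor : Prop := ∀ (index_size : Int) (cube_size : Int) (cube_list : List (List Int)) (variable_ : Int) (index_hash : List (Int × List Int)), Dom_negative_cofactor index_size cube_size cube_list variable_ index_hash → Pre_negative_cofactor index_size cube_size cube_list variable_ index_hash → Spec_negative_cofactor index_size cube_size cube_list variable_ index_hash (negative_cofactor index_size cube_size cube_list variable_ index_hash)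
def Claim_changed_negative_cofactor : Prop := Dom_negative_cofactor (pvDiffWitness_negative_cofactor.1) (pvDiffWitness_negative_cofactor.2.1) (pvDiffWitness_negative_cofactor.2.2.1) (pvDiffWitness_negative_cofactor.2.2.2.1) (pvDiffWitness_negative_cofactor.2.2.2.2) ∧ Pre_negative_cofactor (pvDiffWitness_negative_cofactor.1) (pvDiffWitness_negative_cofactor.2.1) (pvDiffWitness_negative_cofactor.2.2.1) (pvDiffWitness_negative_cofactor.2.2.2.1) (pvDiffWitness_negative_cofactor.2.2.2.2) ∧ D_negative_cofactor (pvDiffWitness_negative_cofactor.1) (pvDiffWitness_negative_cofactor.2.1) (pvDiffWitness_negative_cofactor.2.2.1) (pvDiffWitness_negative_cofactor.2.2.2.1) (pvDiffWitness_negative_cofactor.2.2.2.2) ∧ negative_cofactor (pvDiffWitness_negative_cofactor.1) (pvDiffWitness_negative_cofactor.2.1) (pvDiffWitness_negative_cofactor.2.2.1) (pvDiffWitness_negative_cofactor.2.2.2.1) (pvDiffWitness_negative_cofactor.2.2.2.2) = pvDiffWitnessOut_negative_cofactor.1 ∧ negative_cofactor_alt (pvDiffWitness_negative_cofactor.1)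 (pvDiffWitness_negative_cofactor.2.1) (pvDiffWitness_negative_cofactor.2.2.1) (pvDiffWitness_negative_cofactor.2.2.2.1) (pvDiffWitness_negative_cofactor.2.2.2.2) = pvDiffWitnessOut_negative_cofactor.2 ∧ pvDiffWitnessOut_negative_cofactor.1 ≠ pvDiffWitnessOut_negative_cofactor.2
def Claim_exact_negative_cofactor : Prop := ∀ (index_size : Int) (cube_size : Int) (cube_list : List (List Int)) (variable_ : Int) (index_hash : List (Int × List Int)), Dom_negative_cofactor index_size cube_size cube_list variable_ index_hash → Pre_negative_cofactor index_size cube_size cube_list variable_ index_hash → D_negative_cofactor index_size cube_size cube_list variable_ index_hash → negative_cofactor index_size cube_size cube_list variable_ index_hash ≠ negative_cofactor_alt index_size cube_size cube_list variable_ index_hash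

-- ===== LEMMAS AND PROOFS =====

-- the end state of A's phase 1: position p holds `none` if p was zeroed (z), the cofactor if p was
-- rewritten (t), the original cube otherwise
def pvTempOf (cube_list : List (List Int)) (variable_ : Int) (z t : List Int) : List (Option (List Int)) :=
  (PySem.List.enumerate cube_list 0).map
    (fun pc => if pc.1 ∈ z then none else if pc.1 ∈ t then some ((pvNegCube variable_ pc.2).getD pc.2) else some pc.2)

-- canonical position -> group lookup
def pvAct (g1 gm1 : List Int) (q : Int) : Option Int :=
  if q ∈ g1 then some 1 else if q ∈ gm1 then some (-1) else none

theorem pvFoldFilter {σ : Type} (step : σ → (Int × List Int) → σ)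
    (hid : ∀ s e, ¬ (e.1 = 1 ∨ e.1 = -1) → step s e = s) :
    ∀ (l : List (Int × List Int)) (s : σ),
      l.foldl step s = (l.filter (fun e => decide (e.1 = 1 ∨ e.1 = -1))).foldl step s := by
  intro l
  induction l with
  | nil => intro s; rfl
  | cons e l ih =>
    intro s
    by_cases h : e.1 = 1 ∨ e.1 = -1
    · simp [List.filter_cons, h, List.foldl_cons, ih]
    · simp [List.filter_cons, h, List.foldl_cons, ih, hid s e h]

theorem pvShape (l : List (Int × List Int)) (hn : (l.map Prod.fst).Nodup)
    (hall : ∀ e ∈ l, e.1 = 1 ∨ e.1 = -1) :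
    l = [] ∨ (∃ g, l = [(1, g)]) ∨ (∃ g, l = [(-1, g)]) ∨
    (∃ g h, l = [(1, g), (-1, h)]) ∨ (∃ g h, l = [(-1, g), (1, h)]) := by
  match l with
  | [] => exact Or.inl rfl
  | [(k, g)] =>
    rcases hall (k, g) (by simp) with h | h
    · exact Or.inr (Or.inl ⟨g, by simp at h; simp [h]⟩)
    · exact Or.inr (Or.inr (Or.inl ⟨g, by simp at h; simp [h]⟩))
  | [(k1, g), (k2, h)] =>
    have hne : k1 ≠ k2 := by simp [List.nodup_cons] at hn; exact hn
    rcases hall (k1, g) (by simp) with h1 | h1 <;> rcases hall (k2, h) (by simp) with h2 | h2 <;>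
      simp only at h1 h2
    · exact absurd (h1.trans h2.symm) hne
    · exact Or.inr (Or.inr (Or.inr (Or.inl ⟨g, h, by simp [h1, h2]⟩)))
    · exact Or.inr (Or.inr (Or.inr (Or.inr ⟨g, h, by simp [h1, h2]⟩)))
    · exact absurd (h1.trans h2.symm) hne
  | (a :: b :: c :: rest) =>
    exfalso
    have hab : a.1 ≠ b.1 := by simp [List.nodup_cons] at hn; tauto
    have hac : a.1 ≠ c.1 := by simp [List.nodup_cons] at hn; tauto
    have hbc : b.1 ≠ c.1 := by simp [List.nodup_cons] at hn; tauto
    rcases hall a (by simp) with h1 | h1 <;> rcases hall b (by simp) with h2 | h2 <;>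
      rcases hall c (by simp) with h3 | h3 <;> omega

theorem pvTempOf_length (cl : List (List Int)) (v : Int) (z t : List Int) :
    (pvTempOf cl v z t).length = cl.length := by
  simp [pvTempOf, PySem.List.length_enumerate]

theorem pvTempOf_nil (cl : List (List Int)) (v : Int) :
    pvTempOf cl v [] [] = cl.map some := by
  unfold pvTempOf
  simp only [List.not_mem_nil, if_false]
  rw [show (fun (pc : Int × List Int) => some pc.2) = (some ∘ fun (pc : Int × List Int) => pc.2) from rfl,
    ← List.map_map, PySem.List.map_snd_enumerate cl 0]

theorem pvTempOf_getElem (cl : List (List Int)) (v : Int) (z t : List Int) (k : Nat)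
    (hk : k < (pvTempOf cl v z t).length) :
    (pvTempOf cl v z t)[k] =
      (if (k : Int) ∈ z then none else if (k : Int) ∈ t then
        some ((pvNegCube v (cl[k]'(by simpa [pvTempOf_length] using hk))).getD (cl[k]'(by simpa [pvTempOf_length] using hk)))
      else some (cl[k]'(by simpa [pvTempOf_length] using hk))) := by
  have hk' : k < cl.length := by simpa [pvTempOf_length] using hk
  unfold pvTempOf
  rw [List.getElem_map]
  rw [PySem.List.getElem_enumerate cl 0 k (by simpa [PySem.List.length_enumerate] using hk')]
  simp

theorem pvTempOf_set_none (cl : List (List Int)) (v : Int) (z t : List Int) (i : Int)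
    (h0 : 0 ≤ i) (h1 : i < (cl.length : Int)) :
    (pvTempOf cl v z t).set i.toNat none = pvTempOf cl v (z ++ [i]) t := by
  apply List.ext_getElem (by simp [pvTempOf_length])
  intro k hk1 hk2
  rw [List.getElem_set, pvTempOf_getElem _ _ _ _ _ hk2, pvTempOf_getElem _ _ _ _ _ (by simpa using hk1)]
  by_cases hki : i.toNat = k
  · have : (k : Int) = i := by omega
    simp [hki, this]
  · have : (k : Int) ≠ i := by omega
    simp only [hki, if_false, List.mem_append, List.mem_singleton, this, or_false]

theorem pvTempOf_set_neg (cl : List (List Int)) (v : Int) (z t : List Int) (i : Int)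
    (h0 : 0 ≤ i) (h1 : i < (cl.length : Int)) (hz : i ∉ z) (ht : i ∉ t) (c' : List Int)
    (hc : pvNegCube v (cl[i.toNat]'(by omega)) = some c') :
    (pvTempOf cl v z t).set i.toNat (some c') = pvTempOf cl v z (t ++ [i]) := by
  apply List.ext_getElem (by simp [pvTempOf_length])
  intro k hk1 hk2
  rw [List.getElem_set, pvTempOf_getElem _ _ _ _ _ hk2, pvTempOf_getElem _ _ _ _ _ (by simpa using hk1)]
  by_cases hki : i.toNat = k
  · have hkei : (k : Int) = i := by omega
    subst hki
    simp [hkei, hz, ht, hc]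
  · have : (k : Int) ≠ i := by omega
    simp only [hki, if_false, List.mem_append, List.mem_singleton, this, or_false]

theorem pvInsertRun (g : Int) :
    ∀ (idxs : List Int) (a : PySem.Dict Int Int) (q : Int),
      ((idxs.foldl (fun a idx => a.insert idx g) a).get? q)
        = if q ∈ idxs then some g else a.get? q := by
  intro idxs
  induction idxs with
  | nil => intro a q; simp
  | cons i rest ih =>
    intro a q
    rw [List.foldl_cons, ih]
    by_cases h : q ∈ rest
    · simp [h]
    · simp [h, PySem.Dict.get?_insert]

theorem pvBfold (v : Int) (a : PySem.Dict Int Int) :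
    ∀ (l : List (Int × List Int)) (c : Int) (acc : List (List Int)),
      (∀ pc ∈ l, a.get? pc.1 = some (-1) → (pvNegCube v pc.2).isSome) →
      l.foldl (fun (st : Int × List (List Int)) pc =>
          if a.get? pc.1 = some 1 then (st.1 - 1, st.2)
          else if a.get? pc.1 = some (-1) then
            match pvNegCube v pc.2 with
            | some cube_t => (st.1, st.2 ++ [cube_t])
            | none => st
          else (st.1, st.2 ++ [pc.2])) (c, acc)
      = (c - (l.countP (fun pc => decide (a.get? pc.1 = some 1)) : Int),
         acc ++ l.filterMap (fun pc => if a.get? pc.1 = some 1 then none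
            else if a.get? pc.1 = some (-1) then pvNegCube v pc.2 else some pc.2)) := by
  intro l
  induction l with
  | nil => intro c acc _; simp
  | cons pc rest ih =>
    intro c acc hok
    rw [List.foldl_cons]
    by_cases h1 : a.get? pc.1 = some 1
    · simp only [h1, if_true, if_pos]
      rw [ih (c - 1) acc (fun q hq => hok q (by simp [hq]))]
      simp only [Prod.mk.injEq, List.countP_cons, List.filterMap_cons, h1, if_true]
      constructor
      · simp; ring
      · simp [h1]
    · by_cases h2 : a.get? pc.1 = some (-1)
      · obtain ⟨cube_t, hct⟩ := Option.isSome_iff_exists.mp (hok pc (by simp) h2)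
        simp only [h1, if_false, h2, if_true, hct]
        show List.foldl _ (c, acc ++ [cube_t]) rest = _
        rw [ih c (acc ++ [cube_t]) (fun q hq => hok q (by simp [hq]))]
        simp only [Prod.mk.injEq, List.countP_cons, List.filterMap_cons, h1, h2, if_true, if_false]
        constructor
        · simp [h1]
        · simp [h1, h2, hct]
      · simp only [h1, if_false, h2]
        rw [ih c (acc ++ [pc.2]) (fun q hq => hok q (by simp [hq]))]
        simp only [Prod.mk.injEq, List.countP_cons, List.filterMap_cons, h1, h2, if_false]
        constructor
        · simp [h1]
        · simp [h1, h2]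

theorem pvNegCube_isSome (v : Int) (cube : List Int) (h : -v ∈ cube.tail) :
    (pvNegCube v cube).isSome := by
  cases cube with
  | nil => simp at h
  | cons s t =>
    simp only [List.tail_cons] at h
    cases hr : PySem.List.remove? t (-v) with
    | none => exact absurd h ((PySem.List.remove?_eq_none_iff t (-v)).mp hr)
    | some t' => simp [pvNegCube, hr]

theorem pvAct_negOne (g1 gm1 : List Int) (q : Int) (h : pvAct g1 gm1 q = some (-1)) : q ∈ gm1 := by
  by_cases h1 : q ∈ g1
  · simp [pvAct, h1] at h
  · by_cases h2 : q ∈ gm1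
    · exact h2
    · simp [pvAct, h1, h2] at h

theorem pvAct_one_iff (g1 gm1 : List Int) (q : Int) : pvAct g1 gm1 q = some 1 ↔ q ∈ g1 := by
  unfold pvAct
  split_ifs with h1 h2 <;> simp [*]

-- wrapped position of a Python index (i % n; for -n ≤ i < 0 this is i + n)
theorem pvModNonneg (n : Nat) (i : Int) (hn : 0 < n) : 0 ≤ i % (n : Int) :=
  Int.emod_nonneg i (by omega)

theorem pvModLt (n : Nat) (i : Int) (hn : 0 < n) : i % (n : Int) < (n : Int) :=
  Int.emod_lt_of_pos i (by omega)

theorem pvIdxWrap (n : Nat) (i : Int) (h0 : -(n : Int) ≤ i) (h1 : i < (n : Int)) :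
    PySem.List.pyIdx? n i = some ((i % (n : Int)).toNat) := by
  have hn : 0 < n := by omega
  have hm0 := pvModNonneg n i hn
  have hm1 := pvModLt n i hn
  unfold PySem.List.pyIdx?
  by_cases ha : 0 ≤ i
  · have hlt : i < (n : Int) := h1
    have hid : i % (n : Int) = i := Int.emod_eq_of_lt ha hlt
    simp only [if_pos ha, if_pos hlt, Option.some.injEq]
    omega
  · have hge : -(n : Int) ≤ i := h0
    have hadd : (i + (n : Int)) % (n : Int) = i % (n : Int) := by
      simpa using Int.add_mul_emod_self_left (a := i) (b := (n : Int)) (c := 1)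
    have hval : i % (n : Int) = i + (n : Int) := by
      rw [← hadd]
      exact Int.emod_eq_of_lt (by omega) (by omega)
    simp only [if_neg ha, if_pos hge, Option.some.injEq]
    omega

theorem pvGetWrap {α : Type} (xs : List α) (n : Nat) (hl : xs.length = n) (i : Int)
    (h0 : -(n : Int) ≤ i) (h1 : i < (n : Int)) :
    PySem.List.pyGet? xs i = xs[(i % (n : Int)).toNat]? := by
  subst hl
  simp [PySem.List.pyGet?, pvIdxWrap xs.length i h0 h1]

theorem pvSetWrap {α : Type} (xs : List α) (n : Nat) (hl : xs.length = n) (i : Int) (v : α)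
    (h0 : -(n : Int) ≤ i) (h1 : i < (n : Int)) :
    PySem.List.pySet? xs i v = some (xs.set (i % (n : Int)).toNat v) := by
  subst hl
  simp [PySem.List.pySet?, pvIdxWrap xs.length i h0 h1]

theorem pvSetDWrap {α : Type} (xs : List α) (n : Nat) (hl : xs.length = n) (i : Int) (v : α)
    (h0 : -(n : Int) ≤ i) (h1 : i < (n : Int)) :
    PySem.List.pySetD xs i v = xs.set (i % (n : Int)).toNat v := by
  simp [PySem.List.pySetD, pvSetWrap xs n hl i v h0 h1]

theorem pvGetDWrap {α : Type} (xs : List α) (i : Int) (d : α)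
    (h0 : -(xs.length : Int) ≤ i) (h1 : i < (xs.length : Int)) :
    PySem.List.pyGetD xs i d = xs[(i % (xs.length : Int)).toNat]'(by
      have hn : 0 < xs.length := by omega
      have hm0 := pvModNonneg xs.length i hn
      have hm1 := pvModLt xs.length i hn
      omega) := by
  have hn : 0 < xs.length := by omega
  have hm0 := pvModNonneg xs.length i hn
  have hm1 := pvModLt xs.length i hn
  simp [PySem.List.pyGetD, pvGetWrap xs xs.length rfl i h0 h1,
    List.getElem?_eq_getElem (show (i % (xs.length : Int)).toNat < xs.length by omega)]

theorem pvZeroRunW (cl : List (List Int)) (v : Int) :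
    ∀ (idxs : List Int) (z t : List Int) (c : Int),
      (∀ i ∈ idxs, -(cl.length : Int) ≤ i ∧ i < (cl.length : Int)) →
      idxs.foldl (fun (st2 : List (Option (List Int)) × Int) idx =>
          match PySem.List.pySet? st2.1 idx none with
          | some temp' => (temp', st2.2 - 1)
          | none => st2) (pvTempOf cl v z t, c)
        = (pvTempOf cl v (z ++ idxs.map (fun i => i % (cl.length : Int))) t, c - idxs.length) := by
  intro idxs
  induction idxs with
  | nil => intro z t c _; simp
  | cons i rest ih =>
    intro z t c hb
    obtain ⟨h0, h1⟩ := hb i (by simp)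
    have hn : 0 < cl.length := by omega
    have hm0 := pvModNonneg cl.length i hn
    have hm1 := pvModLt cl.length i hn
    rw [List.foldl_cons]
    have hset : PySem.List.pySet? (pvTempOf cl v z t) i none
        = some ((pvTempOf cl v z t).set (i % (cl.length : Int)).toNat none) :=
      pvSetWrap _ cl.length (pvTempOf_length cl v z t) i none h0 h1
    simp only [hset]
    rw [pvTempOf_set_none cl v z t (i % (cl.length : Int)) (by omega) (by omega)]
    rw [ih (z ++ [i % (cl.length : Int)]) t (c - 1) (fun j hj => hb j (by simp [hj]))]
    simp only [Prod.mk.injEq, List.map_cons]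
    refine ⟨by rw [List.append_assoc]; rfl, by simp; ring⟩

theorem pvNegRunW (cl : List (List Int)) (v : Int) :
    ∀ (idxs : List Int) (z t : List Int),
      (idxs.map (fun i => i % (cl.length : Int))).Nodup →
      (∀ i ∈ idxs, -(cl.length : Int) ≤ i ∧ i < (cl.length : Int) ∧
        i % (cl.length : Int) ∉ z ∧ i % (cl.length : Int) ∉ t ∧
        -v ∈ (PySem.List.pyGetD cl i []).tail) →
      idxs.foldl (pvStepNeg v) (pvTempOf cl v z t)
        = pvTempOf cl v z (t ++ idxs.map (fun i => i % (cl.length : Int))) := by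
  intro idxs
  induction idxs with
  | nil => intro z t _ _; simp
  | cons i rest ih =>
    intro z t hnd hb
    obtain ⟨h0, h1, hz, ht, hmem⟩ := hb i (by simp)
    have hn : 0 < cl.length := by omega
    have hj0 := pvModNonneg cl.length i hn
    have hj1 := pvModLt cl.length i hn
    have hlen : (i % (cl.length : Int)).toNat < cl.length := by omega
    rw [List.foldl_cons]
    have hget : PySem.List.pyGet? (pvTempOf cl v z t) i
        = some ((pvTempOf cl v z t)[(i % (cl.length : Int)).toNat]'(by simp [pvTempOf_length]; omega)) := by
      rw [pvGetWrap _ cl.length (pvTempOf_length cl v z t) i h0 h1]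
      exact List.getElem?_eq_getElem (by simp [pvTempOf_length]; omega)
    have hcube : (pvTempOf cl v z t)[(i % (cl.length : Int)).toNat]'(by simp [pvTempOf_length]; omega)
        = some (cl[(i % (cl.length : Int)).toNat]'hlen) := by
      rw [pvTempOf_getElem]
      have hcast : (((i % (cl.length : Int)).toNat : Nat) : Int) = i % (cl.length : Int) := by omega
      simp only [hcast]
      simp [hz, ht]
    have hmem' : -v ∈ (cl[(i % (cl.length : Int)).toNat]'hlen).tail := by
      rwa [pvGetDWrap cl i [] (by omega) (by omega)] at hmem
    obtain ⟨s, tl, hcl⟩ : ∃ s tl, cl[(i % (cl.length : Int)).toNat]'hlen = s :: tl := by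
      rcases h : cl[(i % (cl.length : Int)).toNat]'hlen with _ | ⟨s, tl⟩
      · rw [h] at hmem'; simp at hmem'
      · exact ⟨s, tl, rfl⟩
    have htl : -v ∈ tl := by rw [hcl] at hmem'; simpa using hmem'
    obtain ⟨tl', htl'⟩ : ∃ tl', PySem.List.remove? tl (-v) = some tl' := by
      rcases h : PySem.List.remove? tl (-v) with _ | tl'
      · rw [PySem.List.remove?_eq_none_iff] at h; exact absurd htl h
      · exact ⟨tl', rfl⟩
    have hnc : pvNegCube v (cl[(i % (cl.length : Int)).toNat]'hlen) = some ((s - 1) :: tl') := by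
      rw [hcl]; simp [pvNegCube, htl']
    have hsetD : PySem.List.pySetD (pvTempOf cl v z t) i (some ((s - 1) :: tl'))
        = (pvTempOf cl v z t).set (i % (cl.length : Int)).toNat (some ((s - 1) :: tl')) :=
      pvSetDWrap _ cl.length (pvTempOf_length cl v z t) i _ h0 h1
    have hstep : pvStepNeg v (pvTempOf cl v z t) i = pvTempOf cl v z (t ++ [i % (cl.length : Int)]) := by
      unfold pvStepNeg
      simp only [hget, hcube, hnc]
      rw [hsetD, pvTempOf_set_neg cl v z t (i % (cl.length : Int)) hj0 hj1 hz ht _ hnc]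
    rw [hstep]
    rw [ih z (t ++ [i % (cl.length : Int)]) (by simpa using hnd.of_cons) (fun j hj => by
      obtain ⟨a0, a1, a2, a3, a4⟩ := hb j (by simp [hj])
      refine ⟨a0, a1, a2, ?_, a4⟩
      simp only [List.mem_append, List.mem_singleton]
      rintro (h | h)
      · exact a3 h
      · have : (fun i => i % (cl.length : Int)) j ∈ rest.map (fun i => i % (cl.length : Int)) :=
          List.mem_map_of_mem hj
        rw [List.map_cons, List.nodup_cons] at hnd
        exact hnd.1 (h ▸ this))]
    simp only [List.map_cons]
    rw [List.append_assoc]; rfl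

theorem pvCountW (cl : List (List Int)) (g1 : List Int) (hnd : g1.Nodup)
    (hub : ∀ i ∈ g1, i < (cl.length : Int)) :
    ((PySem.List.enumerate cl 0).countP fun pc => decide (pc.1 ∈ g1))
      = (g1.filter (fun i => decide (0 ≤ i))).length := by
  have h1 : ((PySem.List.enumerate cl 0).countP fun pc => decide (pc.1 ∈ g1))
      = ((PySem.List.enumerate cl 0).map Prod.fst).countP (fun q => decide (q ∈ g1)) := by
    rw [List.countP_map]; rfl
  rw [h1, PySem.List.map_fst_enumerate]
  simp only [zero_add]
  have hnodupL : (PySem.List.pyRange 0 (cl.length : Int)).Nodup := by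
    rw [PySem.List.pyRange_zero_natCast]
    exact List.nodup_range.map (fun a b h => by exact_mod_cast h)
  rw [List.countP_eq_length_filter]
  have hperm : List.Perm ((PySem.List.pyRange 0 (cl.length : Int)).filter (fun q => decide (q ∈ g1)))
      (g1.filter (fun i => decide (0 ≤ i))) := by
    apply (List.perm_ext_iff_of_nodup (hnodupL.filter _) (hnd.filter _)).mpr
    intro x
    simp only [List.mem_filter, PySem.List.mem_pyRange_one, decide_eq_true_eq]
    constructor
    · exact fun h => ⟨h.2, h.1.1⟩
    · exact fun h => ⟨⟨h.2, hub x h.1⟩, h.1⟩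
  exact hperm.length_eq

theorem pvFinal (cl : List (List Int)) (v cs : Int) (G1 GM1 : List Int) (act : PySem.Dict Int Int)
    (hG1nd : G1.Nodup)
    (hub : ∀ i ∈ G1, i < (cl.length : Int))
    (hm : ∀ i ∈ GM1, -v ∈ (PySem.List.pyGetD cl i []).tail)
    (hact : ∀ q, act.get? q = pvAct G1 GM1 q) :
    (PySem.List.enumerate cl 0).foldl (fun (st : Int × List (List Int)) pc =>
        if act.get? pc.1 = some 1 then (st.1 - 1, st.2)
        else if act.get? pc.1 = some (-1) then
          match pvNegCube v pc.2 with
          | some cube_t => (st.1, st.2 ++ [cube_t])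
          | none => st
        else (st.1, st.2 ++ [pc.2])) (cs, ([] : List (List Int)))
      = (cs - ((G1.filter (fun i => decide (0 ≤ i))).length : Int),
         (pvTempOf cl v G1 GM1).filterMap id) := by
  have hok : ∀ pc ∈ PySem.List.enumerate cl 0, act.get? pc.1 = some (-1) → (pvNegCube v pc.2).isSome := by
    intro pc hpc hq
    obtain ⟨k, hk, rfl⟩ := (PySem.List.mem_enumerate_iff cl 0 pc).mp hpc
    rw [hact] at hq
    have hmemq : ((0 : Int) + k) ∈ GM1 := pvAct_negOne _ _ _ hq
    have hmm := hm _ hmemq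
    rw [PySem.List.pyGetD_eq_getElem _ _ (by omega) (by push_cast; omega)] at hmm
    apply pvNegCube_isSome
    simp only [zero_add] at hmm ⊢
    simpa [Int.toNat_natCast] using hmm
  rw [pvBfold v act (PySem.List.enumerate cl 0) cs [] hok]
  have hcount : ((PySem.List.enumerate cl 0).countP fun pc => decide (act.get? pc.1 = some 1))
      = ((PySem.List.enumerate cl 0).countP fun pc => decide (pc.1 ∈ G1)) := by
    apply List.countP_congr
    intro pc _
    simp only [decide_eq_true_eq, hact, pvAct_one_iff]
  rw [hcount, pvCountW cl G1 hG1nd hub]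
  refine congrArg₂ Prod.mk rfl ?_
  unfold pvTempOf
  rw [List.filterMap_map]
  simp only [List.nil_append]
  apply List.filterMap_congr
  intro pc hpc
  obtain ⟨k, hk, rfl⟩ := (PySem.List.mem_enumerate_iff cl 0 pc).mp hpc
  simp only [Function.comp, hact, zero_add]
  by_cases h1 : (k : Int) ∈ G1
  · simp [pvAct, h1]
  · by_cases h2 : (k : Int) ∈ GM1
    · have hmm := hm _ h2
      rw [PySem.List.pyGetD_eq_getElem _ _ (by omega) (by push_cast; omega)] at hmm
      have hs := pvNegCube_isSome v (cl[((k : Int)).toNat]'(by omega)) hmm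
      obtain ⟨x, hx⟩ := Option.isSome_iff_exists.mp hs
      simp only [Int.toNat_natCast] at hx
      simp [pvAct, h1, h2, hx]
    · simp [pvAct, h1, h2]

-- two filterMaps over the same list differ as soon as they keep the same positions but
-- disagree somewhere
theorem pvFilterMap_ne {α β : Type} (l : List α) (f g : α → Option β)
    (hiff : ∀ y ∈ l, (f y).isSome = (g y).isSome) (x : α) (hx : x ∈ l) (hne : f x ≠ g x) :
    l.filterMap f ≠ l.filterMap g := by
  induction l with
  | nil => simp at hx
  | cons y l' ih =>
    rw [List.filterMap_cons, List.filterMap_cons]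
    by_cases hy : f y = g y
    · have hxl' : x ∈ l' := by
        rcases List.mem_cons.mp hx with h | h
        · exact absurd (h ▸ hy) hne
        · exact h
      have ihl := ih (fun z hz => hiff z (by simp [hz])) hxl'
      cases hfy : f y with
      | none => rw [hy] at hfy; rw [hfy]; exact ihl
      | some c =>
        have hgy : g y = some c := hy ▸ hfy
        rw [hgy]
        intro hcontra
        exact ihl (List.cons.injEq .. ▸ hcontra |>.2)
    · have hfs : (f y).isSome = (g y).isSome := hiff y (by simp)
      cases hfy : f y with
      | none =>
        rw [hfy] at hfs
        cases hgy : g y with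
        | none => exact absurd (hfy.trans hgy.symm) hy
        | some b => rw [hgy] at hfs; simp at hfs
      | some a =>
        rw [hfy] at hfs
        cases hgy : g y with
        | none => rw [hgy] at hfs; simp at hfs
        | some b =>
          have hab : a ≠ b := by
            intro h; exact hy (hfy.trans (h ▸ hgy.symm))
          intro hcontra
          have := (List.cons.injEq .. ▸ hcontra).1
          exact hab this

theorem pvTempOf_filterMap (cl : List (List Int)) (v : Int) (z t : List Int) :
    (pvTempOf cl v z t).filterMap id = (PySem.List.enumerate cl 0).filterMap
      (fun pc => if pc.1 ∈ z then none else if pc.1 ∈ t then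
        some ((pvNegCube v pc.2).getD pc.2) else some pc.2) := by
  unfold pvTempOf
  rw [List.filterMap_map]
  rfl


-- the list the dict holds under a group key present in the filtered items
theorem pvKeyOf (ih : List (Int × List Int)) (k : Int) (g : List Int)
    (h : (k, g) ∈ ((PySem.Dict.ofList ih).items).filter (fun e => decide (e.1 = 1 ∨ e.1 = -1))) :
    pvGroup ih k = g := by
  unfold pvGroup
  rw [PySem.Dict.get?_of_mem_items _ (List.mem_of_mem_filter h) (PySem.Dict.nodup_keys_ofList ih)]
  rfl

theorem pvNoKeyOf (ih : List (Int × List Int)) (k : Int) (hk : k = 1 ∨ k = -1)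
    (h : ∀ g, (k, g) ∉ ((PySem.Dict.ofList ih).items).filter (fun e => decide (e.1 = 1 ∨ e.1 = -1))) :
    pvGroup ih k = [] := by
  unfold pvGroup
  cases hq : (PySem.Dict.ofList ih).get? k with
  | none => rfl
  | some g =>
    exact absurd (List.mem_filter.mpr ⟨PySem.Dict.mem_items_of_get?_eq_some _ hq, by simpa using hk⟩)
      (h g)

theorem pvFlNodup (ih : List (Int × List Int)) :
    ((((PySem.Dict.ofList ih).items).filter (fun e => decide (e.1 = 1 ∨ e.1 = -1))).map Prod.fst).Nodup := by
  have hkeysnd : (((PySem.Dict.ofList ih).items).map Prod.fst).Nodup := by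
    simpa [PySem.Dict.keys] using PySem.Dict.nodup_keys_ofList (ν := List Int) ih
  exact hkeysnd.sublist (List.filter_sublist.map Prod.fst)

theorem pvFlAll (ih : List (Int × List Int)) :
    ∀ e ∈ ((PySem.Dict.ofList ih).items).filter (fun e => decide (e.1 = 1 ∨ e.1 = -1)),
      e.1 = 1 ∨ e.1 = -1 := by
  intro e he
  simpa using List.of_mem_filter he

-- A's value under Pre_: group 1 drops the cubes at the WRAPPED positions, group -1 rewrites there
theorem pvAval (is cs : Int) (cl : List (List Int)) (v : Int) (ih : List (Int × List Int))
    (hrange : ∀ idx ∈ pvGroup ih 1 ++ pvGroup ih (-1), PySem.Raise.InRange cl.length idx)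
    (hnodupW : ((pvGroup ih 1 ++ pvGroup ih (-1)).map (fun i => i % (cl.length : Int))).Nodup)
    (hmem : ∀ idx ∈ pvGroup ih (-1), -v ∈ (PySem.List.pyGetD cl idx []).tail) :
    negative_cofactor is cs cl v ih
      = (is - 1, cs - ((pvGroup ih 1).length : Int),
         (pvTempOf cl v ((pvGroup ih 1).map (fun i => i % (cl.length : Int)))
                       ((pvGroup ih (-1)).map (fun i => i % (cl.length : Int)))).filterMap id) := by
  have hb : ∀ i ∈ pvGroup ih 1 ++ pvGroup ih (-1), -(cl.length : Int) ≤ i ∧ i < (cl.length : Int) := by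
    intro i hi
    simpa [PySem.Raise.InRange] using hrange i hi
  simp only [negative_cofactor]
  rw [pvFoldFilter (fun (st : List (Option (List Int)) × Int) e =>
      if e.1 = 1 then
        e.2.foldl (fun st2 idx =>
          match PySem.List.pySet? st2.1 idx none with
          | some temp' => (temp', st2.2 - 1)
          | none => st2) st
      else if e.1 = -1 then
        (e.2.foldl (pvStepNeg v) st.1, st.2)
      else st)
    (by intro s e h; push Not at h; simp [h.1, h.2]) ((PySem.Dict.ofList ih).items)]
  rcases pvShape _ (pvFlNodup ih) (pvFlAll ih) with hc | ⟨g, hc⟩ | ⟨g, hc⟩ | ⟨g, h', hc⟩ | ⟨g, h', hc⟩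
  all_goals rw [hc]
  · have hG1 : pvGroup ih 1 = [] := pvNoKeyOf ih 1 (Or.inl rfl) (fun g hg => by rw [hc] at hg; simp at hg)
    have hGM1 : pvGroup ih (-1) = [] := pvNoKeyOf ih (-1) (Or.inr rfl) (fun g hg => by rw [hc] at hg; simp at hg)
    rw [hG1, hGM1]
    simp only [List.foldl_nil, List.map_nil, List.length_nil]
    rw [pvTempOf_nil]
    simp
  · have hG1 : pvGroup ih 1 = g := pvKeyOf ih 1 g (by rw [hc]; simp)
    have hGM1 : pvGroup ih (-1) = [] := pvNoKeyOf ih (-1) (Or.inr rfl) (fun g' hg => by rw [hc] at hg; simp at hg)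
    rw [hG1, hGM1] at hb ⊢
    simp only [List.foldl_cons, List.foldl_nil,
      show ((1:Int) = 1) = True from by simp, if_true]
    rw [← pvTempOf_nil cl v,
      pvZeroRunW cl v g [] [] cs (fun i hi => hb i (by simp [hi]))]
    simp
  · have hGM1 : pvGroup ih (-1) = g := pvKeyOf ih (-1) g (by rw [hc]; simp)
    have hG1 : pvGroup ih 1 = [] := pvNoKeyOf ih 1 (Or.inl rfl) (fun g' hg => by rw [hc] at hg; simp at hg)
    rw [hG1, hGM1] at hb ⊢
    rw [hGM1] at hmem
    rw [hG1, hGM1] at hnodupW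
    simp only [List.foldl_cons, List.foldl_nil,
      show ((-1:Int) = 1) = False from by simp, show ((-1:Int) = -1) = True from by simp,
      if_true, if_false]
    rw [← pvTempOf_nil cl v,
      pvNegRunW cl v g [] [] (by simpa using hnodupW) (fun i hi => by
        obtain ⟨h0, h1⟩ := hb i (by simp [hi])
        exact ⟨h0, h1, by simp, by simp, hmem i hi⟩)]
    simp
  · have hG1 : pvGroup ih 1 = g := pvKeyOf ih 1 g (by rw [hc]; simp)
    have hGM1 : pvGroup ih (-1) = h' := pvKeyOf ih (-1) h' (by rw [hc]; simp)
    rw [hG1, hGM1] at hb ⊢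
    rw [hGM1] at hmem
    rw [hG1, hGM1] at hnodupW
    rw [List.map_append] at hnodupW
    have hparts := List.nodup_append.mp hnodupW
    simp only [List.foldl_cons, List.foldl_nil,
      show ((1:Int) = 1) = True from by simp, show ((-1:Int) = 1) = False from by simp,
      show ((-1:Int) = -1) = True from by simp, if_true, if_false]
    rw [← pvTempOf_nil cl v,
      pvZeroRunW cl v g [] [] cs (fun i hi => hb i (by simp [hi]))]
    simp only [List.nil_append]
    rw [pvNegRunW cl v h' (g.map (fun i => i % (cl.length : Int))) [] hparts.2.1 (fun i hi => by
      obtain ⟨h0, h1⟩ := hb i (by simp [hi])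
      refine ⟨h0, h1, ?_, by simp, hmem i hi⟩
      intro hig
      exact hparts.2.2 _ hig _ (List.mem_map_of_mem hi) rfl)]
    simp
  · have hGM1 : pvGroup ih (-1) = g := pvKeyOf ih (-1) g (by rw [hc]; simp)
    have hG1 : pvGroup ih 1 = h' := pvKeyOf ih 1 h' (by rw [hc]; simp)
    rw [hG1, hGM1] at hb ⊢
    rw [hGM1] at hmem
    rw [hG1, hGM1] at hnodupW
    rw [List.map_append] at hnodupW
    have hparts := List.nodup_append.mp hnodupW
    simp only [List.foldl_cons, List.foldl_nil,
      show ((1:Int) = 1) = True from by simp, show ((-1:Int) = 1) = False from by simp,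
      show ((-1:Int) = -1) = True from by simp, if_true, if_false]
    rw [← pvTempOf_nil cl v,
      pvNegRunW cl v g [] [] hparts.2.1 (fun i hi => by
        obtain ⟨h0, h1⟩ := hb i (by simp [hi])
        exact ⟨h0, h1, by simp, by simp, hmem i hi⟩)]
    simp only [List.nil_append]
    rw [pvZeroRunW cl v h' [] (g.map (fun i => i % (cl.length : Int))) cs (fun i hi => hb i (by simp [hi]))]
    simp

-- B's value under Pre_: only nonnegative group indices ever match a cube position
theorem pvBval (is cs : Int) (cl : List (List Int)) (v : Int) (ih : List (Int × List Int))
    (hrange : ∀ idx ∈ pvGroup ih 1 ++ pvGroup ih (-1), PySem.Raise.InRange cl.length idx)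
    (hnodupW : ((pvGroup ih 1 ++ pvGroup ih (-1)).map (fun i => i % (cl.length : Int))).Nodup)
    (hmem : ∀ idx ∈ pvGroup ih (-1), -v ∈ (PySem.List.pyGetD cl idx []).tail) :
    negative_cofactor_alt is cs cl v ih
      = (is - 1, cs - (((pvGroup ih 1).filter (fun i => decide (0 ≤ i))).length : Int),
         (pvTempOf cl v (pvGroup ih 1) (pvGroup ih (-1))).filterMap id) := by
  have hnd : (pvGroup ih 1 ++ pvGroup ih (-1)).Nodup := hnodupW.of_map
  have hub : ∀ i ∈ pvGroup ih 1, i < (cl.length : Int) := by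
    intro i hi
    have := hrange i (by simp [hi])
    simpa [PySem.Raise.InRange] using this.2
  have hG1nd : (pvGroup ih 1).Nodup := (List.nodup_append.mp hnd).1
  simp only [negative_cofactor_alt]
  rw [pvFoldFilter (fun (a : PySem.Dict Int Int) e =>
      if e.1 = 1 ∨ e.1 = -1 then e.2.foldl (fun a idx => a.insert idx e.1) a else a)
    (by intro s e h; simp [h]) ((PySem.Dict.ofList ih).items)]
  rcases pvShape _ (pvFlNodup ih) (pvFlAll ih) with hc | ⟨g, hc⟩ | ⟨g, hc⟩ | ⟨g, h', hc⟩ | ⟨g, h', hc⟩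
  all_goals rw [hc]
  · have hG1 : pvGroup ih 1 = [] := pvNoKeyOf ih 1 (Or.inl rfl) (fun g hg => by rw [hc] at hg; simp at hg)
    have hGM1 : pvGroup ih (-1) = [] := pvNoKeyOf ih (-1) (Or.inr rfl) (fun g hg => by rw [hc] at hg; simp at hg)
    rw [hG1] at hG1nd hub
    rw [hGM1] at hmem
    rw [hG1, hGM1]
    have hact : ∀ q, (PySem.Dict.empty : PySem.Dict Int Int).get? q = pvAct [] [] q := by
      intro q; simp [pvAct, PySem.Dict.get?_empty]
    rw [List.foldl_nil, pvFinal cl v cs [] [] _ hG1nd hub hmem hact]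
  · have hG1 : pvGroup ih 1 = g := pvKeyOf ih 1 g (by rw [hc]; simp)
    have hGM1 : pvGroup ih (-1) = [] := pvNoKeyOf ih (-1) (Or.inr rfl) (fun g' hg => by rw [hc] at hg; simp at hg)
    rw [hG1] at hG1nd hub
    rw [hGM1] at hmem
    rw [hG1, hGM1]
    simp only [List.foldl_cons, List.foldl_nil,
      show (((1:Int) = 1 ∨ (1:Int) = -1)) = True from by simp,
      show ((1:Int) = 1) = True from by simp, show ((1:Int) = -1) = False from by simp,
      true_or, or_true, false_or, or_false, if_true]
    have hact : ∀ q, ((g.foldl (fun a idx => a.insert idx 1) PySem.Dict.empty : PySem.Dict Int Int)).get? q = pvAct g [] q := by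
      intro q
      rw [pvInsertRun 1 g PySem.Dict.empty q]
      by_cases hq : q ∈ g <;> simp [pvAct, hq, PySem.Dict.get?_empty]
    rw [pvFinal cl v cs g [] _ hG1nd hub hmem hact]
  · have hGM1 : pvGroup ih (-1) = g := pvKeyOf ih (-1) g (by rw [hc]; simp)
    have hG1 : pvGroup ih 1 = [] := pvNoKeyOf ih 1 (Or.inl rfl) (fun g' hg => by rw [hc] at hg; simp at hg)
    rw [hG1] at hG1nd hub
    rw [hGM1] at hmem
    rw [hG1, hGM1]
    simp only [List.foldl_cons, List.foldl_nil,
      show (((-1:Int) = 1 ∨ (-1:Int) = -1)) = True from by simp,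
      show ((-1:Int) = 1) = False from by simp, show ((-1:Int) = -1) = True from by simp,
      true_or, or_true, false_or, or_false, if_true]
    have hact : ∀ q, ((g.foldl (fun a idx => a.insert idx (-1)) PySem.Dict.empty : PySem.Dict Int Int)).get? q = pvAct [] g q := by
      intro q
      rw [pvInsertRun (-1) g PySem.Dict.empty q]
      by_cases hq : q ∈ g <;> simp [pvAct, hq, PySem.Dict.get?_empty]
    rw [pvFinal cl v cs [] g _ hG1nd hub hmem hact]
  · have hG1 : pvGroup ih 1 = g := pvKeyOf ih 1 g (by rw [hc]; simp)
    have hGM1 : pvGroup ih (-1) = h' := pvKeyOf ih (-1) h' (by rw [hc]; simp)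
    rw [hG1, hGM1] at hnd
    rw [hG1] at hG1nd hub
    rw [hGM1] at hmem
    rw [hG1, hGM1]
    have hdisj : ∀ a ∈ g, ∀ b ∈ h', a ≠ b := (List.nodup_append.mp hnd).2.2
    simp only [List.foldl_cons, List.foldl_nil,
      show (((1:Int) = 1 ∨ (1:Int) = -1)) = True from by simp,
      show (((-1:Int) = 1 ∨ (-1:Int) = -1)) = True from by simp,
      show ((-1:Int) = 1) = False from by simp, show ((-1:Int) = -1) = True from by simp,
      true_or, or_true, false_or, or_false, if_true]
    have hact : ∀ q, ((h'.foldl (fun a idx => a.insert idx (-1))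
        (g.foldl (fun a idx => a.insert idx 1) PySem.Dict.empty) : PySem.Dict Int Int)).get? q = pvAct g h' q := by
      intro q
      rw [pvInsertRun (-1) h' _ q, pvInsertRun 1 g PySem.Dict.empty q]
      by_cases hq1 : q ∈ g
      · have hq2 : q ∉ h' := fun hq2 => hdisj q hq1 q hq2 rfl
        simp [pvAct, hq1, hq2]
      · by_cases hq2 : q ∈ h' <;> simp [pvAct, hq1, hq2, PySem.Dict.get?_empty]
    rw [pvFinal cl v cs g h' _ hG1nd hub hmem hact]
  · have hGM1 : pvGroup ih (-1) = g := pvKeyOf ih (-1) g (by rw [hc]; simp)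
    have hG1 : pvGroup ih 1 = h' := pvKeyOf ih 1 h' (by rw [hc]; simp)
    rw [hG1] at hG1nd hub
    rw [hGM1] at hmem
    rw [hG1, hGM1]
    simp only [List.foldl_cons, List.foldl_nil,
      show (((1:Int) = 1 ∨ (1:Int) = -1)) = True from by simp,
      show (((-1:Int) = 1 ∨ (-1:Int) = -1)) = True from by simp,
      show ((-1:Int) = 1) = False from by simp, show ((-1:Int) = -1) = True from by simp,
      true_or, or_true, false_or, or_false, if_true]
    have hact : ∀ q, ((h'.foldl (fun a idx => a.insert idx 1)
        (g.foldl (fun a idx => a.insert idx (-1)) PySem.Dict.empty) : PySem.Dict Int Int)).get? q = pvAct h' g q := by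
      intro q
      rw [pvInsertRun 1 h' _ q, pvInsertRun (-1) g PySem.Dict.empty q]
      by_cases hq1 : q ∈ h' <;> by_cases hq2 : q ∈ g <;>
        simp [pvAct, hq1, hq2, PySem.Dict.get?_empty]
    rw [pvFinal cl v cs h' g _ hG1nd hub hmem hact]


-- ===== VERDICT (by name: the statements are the Claim_ definitions above) =====
theorem negative_cofactor_spec : Claim_unchanged_negative_cofactor := by
  intro is cs cl v ih _dom hpre
  unfold Spec_negative_cofactor
  intro hD
  obtain ⟨hrange, hnodupW, hmem⟩ := hpre
  have hpos : ∀ i ∈ pvGroup ih 1 ++ pvGroup ih (-1), 0 ≤ i := by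
    intro i hi
    by_contra h
    exact hD ⟨i, hi, by omega⟩
  have hlt : ∀ i ∈ pvGroup ih 1 ++ pvGroup ih (-1), i < (cl.length : Int) := by
    intro i hi
    simpa [PySem.Raise.InRange] using (hrange i hi).2
  have hmapid : ∀ (l : List Int), (∀ i ∈ l, i ∈ pvGroup ih 1 ++ pvGroup ih (-1)) →
      l.map (fun i => i % (cl.length : Int)) = l := by
    intro l hl
    have h1 : l.map (fun i => i % (cl.length : Int)) = l.map id :=
      List.map_congr_left (fun i hi => by
        simpa using Int.emod_eq_of_lt (hpos i (hl i hi)) (hlt i (hl i hi)))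
    rw [h1, List.map_id]
  rw [pvAval is cs cl v ih hrange hnodupW hmem, pvBval is cs cl v ih hrange hnodupW hmem]
  rw [hmapid (pvGroup ih 1) (fun i hi => by simp [hi]),
    hmapid (pvGroup ih (-1)) (fun i hi => by simp [hi])]
  rw [List.filter_eq_self.mpr (fun i hi => by simpa using hpos i (by simp [hi]))]

theorem negative_cofactor_changed : Claim_changed_negative_cofactor := by
  unfold Claim_changed_negative_cofactor; decide

theorem negative_cofactor_tight : Claim_exact_negative_cofactor := by
  intro is cs cl v ih _dom hpre hD
  obtain ⟨hrange, hnodupW, hmem⟩ := hpre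
  have hb : ∀ i ∈ pvGroup ih 1 ++ pvGroup ih (-1), -(cl.length : Int) ≤ i ∧ i < (cl.length : Int) := by
    intro i hi
    simpa [PySem.Raise.InRange] using hrange i hi
  rw [pvAval is cs cl v ih hrange hnodupW hmem, pvBval is cs cl v ih hrange hnodupW hmem]
  obtain ⟨i0, hi0, hneg⟩ := hD
  have hn : 0 < cl.length := by
    obtain ⟨a, b⟩ := hb i0 hi0
    omega
  by_cases hGneg : ∃ i ∈ pvGroup ih 1, i < 0
  · -- a negative index in group 1: A decrements cube_size for it, B cannot match it
    obtain ⟨j, hj, hjneg⟩ := hGneg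
    intro heq
    have h2 := congrArg (fun p : Int × Int × List (List Int) => p.2.1) heq
    simp only at h2
    have hflt : ((pvGroup ih 1).filter (fun i => decide (0 ≤ i))).length < (pvGroup ih 1).length :=
      List.length_filter_lt_length_iff_exists.mpr ⟨j, hj, by simpa using hjneg⟩
    omega
  · -- the negative index is in group -1: A rewrites the cube at the wrapped position, B keeps it
    have hG1pos : ∀ i ∈ pvGroup ih 1, 0 ≤ i := by
      intro i hi
      by_contra h
      exact hGneg ⟨i, hi, by omega⟩
    have hi0M : i0 ∈ pvGroup ih (-1) := by
      rcases List.mem_append.mp hi0 with h | h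
      · exact absurd hneg (by have := hG1pos i0 h; omega)
      · exact h
    have hmapG1 : (pvGroup ih 1).map (fun i => i % (cl.length : Int)) = pvGroup ih 1 := by
      have h1 : (pvGroup ih 1).map (fun i => i % (cl.length : Int)) = (pvGroup ih 1).map id :=
        List.map_congr_left (fun i hi => by
          have hu := (hb i (by simp [hi])).2
          simpa using Int.emod_eq_of_lt (hG1pos i hi) hu)
      rw [h1, List.map_id]
    intro heq
    have h3 := congrArg (fun p : Int × Int × List (List Int) => p.2.2) heq
    simp only at h3
    rw [hmapG1, pvTempOf_filterMap, pvTempOf_filterMap] at h3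
    have hp00 := pvModNonneg cl.length i0 hn
    have hp01 := pvModLt cl.length i0 hn
    have hp0mapM : i0 % (cl.length : Int) ∈ (pvGroup ih (-1)).map (fun i => i % (cl.length : Int)) :=
      List.mem_map_of_mem hi0M
    have hp0G1 : i0 % (cl.length : Int) ∉ pvGroup ih 1 := by
      intro hmemG
      have h1 : i0 % (cl.length : Int) ∈ (pvGroup ih 1).map (fun i => i % (cl.length : Int)) := by
        rw [hmapG1]; exact hmemG
      rw [List.map_append] at hnodupW
      exact (List.nodup_append.mp hnodupW).2.2 _ h1 _ hp0mapM rfl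
    have hp0M : i0 % (cl.length : Int) ∉ pvGroup ih (-1) := by
      intro hmemM
      have hndM : ((pvGroup ih (-1)).map (fun i => i % (cl.length : Int))).Nodup := by
        rw [List.map_append] at hnodupW
        exact (List.nodup_append.mp hnodupW).2.1
      have := List.inj_on_of_nodup_map hndM hmemM hi0M
        (by simpa using Int.emod_eq_of_lt hp00 hp01)
      omega
    have hlen : (i0 % (cl.length : Int)).toNat < cl.length := by omega
    have hxmem : ((i0 % (cl.length : Int), cl[(i0 % (cl.length : Int)).toNat]'hlen) : Int × List Int)
        ∈ PySem.List.enumerate cl 0 := by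
      rw [PySem.List.mem_enumerate_iff]
      refine ⟨(i0 % (cl.length : Int)).toNat, hlen, ?_⟩
      simp only [Prod.mk.injEq]
      exact ⟨by omega, by simp⟩
    obtain ⟨hb0, hb1⟩ := hb i0 hi0
    have hmm : -v ∈ (cl[(i0 % (cl.length : Int)).toNat]'hlen).tail := by
      have := hmem i0 hi0M
      rwa [pvGetDWrap cl i0 [] hb0 hb1] at this
    obtain ⟨s, tl, hcl⟩ : ∃ s tl, cl[(i0 % (cl.length : Int)).toNat]'hlen = s :: tl := by
      rcases h : cl[(i0 % (cl.length : Int)).toNat]'hlen with _ | ⟨s, tl⟩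
      · rw [h] at hmm; simp at hmm
      · exact ⟨s, tl, rfl⟩
    have htl : -v ∈ tl := by rw [hcl] at hmm; simpa using hmm
    obtain ⟨tl', htl'⟩ : ∃ tl', PySem.List.remove? tl (-v) = some tl' := by
      rcases h : PySem.List.remove? tl (-v) with _ | tl'
      · rw [PySem.List.remove?_eq_none_iff] at h; exact absurd htl h
      · exact ⟨tl', rfl⟩
    have hnc : pvNegCube v (cl[(i0 % (cl.length : Int)).toNat]'hlen) = some ((s - 1) :: tl') := by
      rw [hcl]; simp [pvNegCube, htl']
    refine pvFilterMap_ne (PySem.List.enumerate cl 0) _ _ ?_ _ hxmem ?_ h3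
    · intro y _
      by_cases hyg : y.1 ∈ pvGroup ih 1
      · simp [hyg]
      · simp only [hyg, if_false]
        split_ifs <;> simp
    · simp only [hp0G1, if_false, hp0mapM, if_true, hp0M]
      rw [hnc, hcl]
      simp only [Option.getD_some]
      intro hcontra
      simp only [Option.some.injEq, List.cons.injEq] at hcontra
      omega
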